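-- pv_equiv track=rewrite | github.com/ByteBaker/stego | src/stego/methods/em_st.py | _insert_symbols_in_text
-- ===== SOURCE A (Python) =====
-- def _insert_symbols_in_text(cover_text: str, symbols: list) -> str:
--     """Insert symbols into cover text at word boundaries."""
--     words = cover_text.split()
--
--     if not symbols:
--         return cover_text
--
--     result_words = []
--     symbol_index = 0
--
--     # Insert symbols between words and at the end
--     for i, word in enumerate(words):
--         result_words.append(word)
--
--         # Add symbol after word if we have more symbols
--         if symbol_index < len(symbols):
--             result_words.append(symbols[symbol_index])
--             symbol_index += 1
--
--     # Add remaining symbols at the end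
--     while symbol_index < len(symbols):
--         result_words.append(symbols[symbol_index])
--         symbol_index += 1
--
--     return ' '.join(result_words)
-- ===== SOURCE B (Python) =====
-- def _insert_symbols_in_text(cover_text: str, symbols: list) -> str:
--     """Insert symbols into cover text at word boundaries."""
--     if not symbols:
--         return cover_text
--     # Ping-pong: two stacks (reversed so pop() is O(1)); keep popping from the
--     # active stack and swapping roles, so words and symbols alternate; when the
--     # active stack empties, the other one holds the whole tail.
--     a = cover_text.split()[::-1]
--     b = symbols[::-1]
--     out = []
--     while a:
--         out.append(a.pop())
--         a, b = b, a
--     out.extend(reversed(b))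
--     return ' '.join(out)
-- ===== Notes on version B (the rewrite author's own statement) =====
-- stated objective: alternative
-- what changed: Replaces A's index-counter loop over enumerate plus a trailing while-loop with a single ping-pong loop over two stacks (reversed words and symbols): pop from the active stack, swap the stacks, and append the surviving stack's tail when one empties.
import Mathlib
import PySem

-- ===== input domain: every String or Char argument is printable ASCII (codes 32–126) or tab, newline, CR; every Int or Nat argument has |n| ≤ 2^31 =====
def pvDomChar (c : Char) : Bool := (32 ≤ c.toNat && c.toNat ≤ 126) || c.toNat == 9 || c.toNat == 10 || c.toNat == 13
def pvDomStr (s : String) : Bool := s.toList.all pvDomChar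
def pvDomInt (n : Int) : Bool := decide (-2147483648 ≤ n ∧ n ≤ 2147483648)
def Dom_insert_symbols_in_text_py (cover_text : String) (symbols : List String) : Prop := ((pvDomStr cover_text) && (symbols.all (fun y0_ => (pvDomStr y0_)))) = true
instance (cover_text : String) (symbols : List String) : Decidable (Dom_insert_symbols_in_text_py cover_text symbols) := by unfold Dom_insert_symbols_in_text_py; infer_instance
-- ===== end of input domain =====

-- B replaces A's index-counter loop plus trailing while-loop by a ping-pong loop over two reversed stacks that swaps them after each pop (alternative decomposition; same cost).


-- ===== PORT A =====
-- the trailing `while symbol_index < len(symbols)` loop of A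
def pvAppendRest (res : List String) (symbols : List String) (i : Nat) : List String :=
  if i < symbols.length then pvAppendRest (res ++ [symbols.getD i ""]) symbols (i + 1) else res
termination_by symbols.length - i

def insert_symbols_in_text_py (cover_text : String) (symbols : List String) : String :=
  let words := PySem.Str.split₀ cover_text
  if symbols = [] then cover_text
  else
    let st := words.foldl (fun (st : List String × Nat) word =>
      let r := st.1 ++ [word]
      if st.2 < symbols.length then (r ++ [symbols.getD st.2 ""], st.2 + 1) else (r, st.2))
      (([] : List String), 0)
    PySem.Str.join " " (pvAppendRest st.1 symbols st.2)

-- ===== PORT B =====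
-- the `while a:` ping-pong loop of B: pop the last element of the active stack, swap stacks
def pvPingPong (out a b : List String) : List String :=
  match a with
  | [] => out ++ b.reverse
  | x :: rest => pvPingPong (out ++ [(x :: rest).getLast (by simp)]) b (x :: rest).dropLast
termination_by a.length + b.length
decreasing_by simp; omega

def insert_symbols_in_text_py_alt (cover_text : String) (symbols : List String) : String :=
  if symbols = [] then cover_text
  else
    let a := (PySem.Str.split₀ cover_text).reverse
    let b := symbols.reverse
    PySem.Str.join " " (pvPingPong [] a b)

-- ===== PRECONDITION & SPEC =====
def Spec_insert_symbols_in_text_py (cover_text : String) (symbols : List String) (out : String) : Prop := out = insert_symbols_in_text_py_alt cover_text symbols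
instance (cover_text : String) (symbols : List String) (out : String) : Decidable (Spec_insert_symbols_in_text_py cover_text symbols out) := by unfold Spec_insert_symbols_in_text_py; infer_instance

-- ===== CLAIM (what is proved, stated in full; the proofs are below) =====
def Claim_equal_insert_symbols_in_text_py : Prop := ∀ (cover_text : String) (symbols : List String), Dom_insert_symbols_in_text_py cover_text symbols → Spec_insert_symbols_in_text_py cover_text symbols (insert_symbols_in_text_py cover_text symbols)

-- ===== LEMMAS AND PROOFS =====

-- proof-only helper: alternate the heads of two lists, appending the survivor
def pvInterleave : List String → List String → List String
  | [], ys => ys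
  | x :: xs, ys => x :: pvInterleave ys xs
termination_by xs ys => xs.length + ys.length

theorem pvInterleave_nil_right (xs : List String) : pvInterleave xs [] = xs := by
  cases xs <;> simp [pvInterleave]

theorem pvAppendRest_eq (symbols : List String) : ∀ (i : Nat) (res : List String),
    pvAppendRest res symbols i = res ++ symbols.drop i := by
  intro i
  induction hn : symbols.length - i using Nat.strong_induction_on generalizing i with
  | _ n ih =>
    intro res
    rw [pvAppendRest]
    split
    · rename_i h
      rw [ih (symbols.length - (i + 1)) (by omega) (i + 1) rfl]
      rw [List.drop_eq_getElem_cons h, List.getD_eq_getElem _ _ h]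
      simp
    · rename_i h
      rw [List.drop_of_length_le (by omega)]
      simp

theorem pvFoldl_eq (symbols : List String) : ∀ (words acc : List String) (i : Nat), i ≤ symbols.length →
    (let st := words.foldl (fun (st : List String × Nat) word =>
        let r := st.1 ++ [word]
        if st.2 < symbols.length then (r ++ [symbols.getD st.2 ""], st.2 + 1) else (r, st.2))
        (acc, i)
     st.1 ++ symbols.drop st.2) = acc ++ pvInterleave words (symbols.drop i) := by
  intro words
  induction words with
  | nil => intro acc i _; simp [pvInterleave]
  | cons w ws ih =>
    intro acc i hi
    simp only [List.foldl_cons]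
    by_cases h : i < symbols.length
    · rw [if_pos h]
      rw [ih _ (i + 1) (by omega)]
      rw [List.drop_eq_getElem_cons h, List.getD_eq_getElem _ _ h,
        pvInterleave, pvInterleave]
      simp
    · rw [if_neg h]
      have hlen : i = symbols.length := by omega
      rw [ih _ i hi]
      subst hlen
      simp [pvInterleave_nil_right]

theorem pvPingPong_nil (out b : List String) : pvPingPong out [] b = out ++ b.reverse := by
  rw [pvPingPong]

theorem pvPingPong_cons (out b : List String) (x : String) (rest : List String) :
    pvPingPong out (x :: rest) b
      = pvPingPong (out ++ [(x :: rest).getLast (by simp)]) b (x :: rest).dropLast := by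
  rw [pvPingPong]

-- B's ping-pong loop on reversed stacks computes the interleaving
theorem pvPingPong_eq : ∀ (xs ys out : List String),
    pvPingPong out xs.reverse ys.reverse = out ++ pvInterleave xs ys := by
  intro xs ys
  induction hn : xs.length + ys.length using Nat.strong_induction_on generalizing xs ys with
  | _ n ih =>
    intro out
    cases xs with
    | nil => simp [pvPingPong_nil, pvInterleave]
    | cons x xs' =>
      cases hrev : (x :: xs').reverse with
      | nil => simp at hrev
      | cons h t =>
        have hlast : (h :: t).getLast (by simp) = x := by
          have h1 : (h :: t).getLast? = some x := by
            rw [← hrev, List.getLast?_reverse]; simp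
          have h2 : (h :: t).getLast? = some ((h :: t).getLast (by simp)) :=
            List.getLast?_eq_some_getLast _
          rw [h1] at h2
          exact (Option.some.inj h2).symm
        have hdrop : (h :: t).dropLast = xs'.reverse := by
          rw [← hrev, List.dropLast_reverse]
          simp
        rw [pvPingPong_cons, hlast, hdrop,
          ih (ys.length + xs'.length) (by simp at hn ⊢; omega) ys xs' rfl (out ++ [x])]
        rw [show pvInterleave (x :: xs') ys = x :: pvInterleave ys xs' from by rw [pvInterleave]]
        simp

-- ===== VERDICT (by name: the statement is the Claim_ definition above) =====
theorem insert_symbols_in_text_py_spec : Claim_equal_insert_symbols_in_text_py := by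
  intro cover_text symbols _
  unfold Spec_insert_symbols_in_text_py insert_symbols_in_text_py insert_symbols_in_text_py_alt
  by_cases hs : symbols = []
  · simp [hs]
  · simp only [if_neg hs]
    congr 1
    rw [pvAppendRest_eq, pvFoldl_eq symbols _ [] 0 (by omega), pvPingPong_eq]
    simp
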